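-- pv_equiv track=rewrite | github.com/ddejohn/misc | concatenate_overlapping_strings.py | get_links_and_joiners
-- ===== SOURCE A (Python) =====
-- import itertools
-- from typing import Set, Tuple, Dict, List
--
-- Links = Dict[str, str]
--
-- def get_match(s1: str, s2: str, min_overlap: int = 3) -> str:
--     """
--     'Slides' `s2` from the left over the end of `s1`,
--     starting at `min_overlap`. Adds all common subtstrings
--     that are found and returns the longest among them.
--     """
--     i = min_overlap
--     matches = []
--     while i < min(len(s1), len(s2)):
--         if s1[-i:] != s2[:i]:
--             i += 1
--             continue
--         matches.append(s1[-i:])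
--         i += 1
--     return max(matches, key=len) if matches else ""
--
-- def get_links_and_joiners(strings: List[str]) -> Tuple[Links, Set[str]]:
--     """
--     Links will be key:value pairs of words that have a common
--     substring where the end of `s1` overlaps with the start of `s2`.
--     """
--     links = dict()
--     joiners = set()
--     for s1, s2 in itertools.permutations(strings, 2):
--         match = get_match(s1, s2)
--         if match:
--             joiners.add(match)
--             links[s1] = s2
--     return links, joiners
-- ===== SOURCE B (Python) =====
-- def get_links_and_joiners(strings):
--     """
--     Same result as A: for every ordered pair of distinct positions, find the
--     longest overlap (>= 3, < min length) where the end of s1 matches the start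
--     of s2. Instead of collecting every overlap length bottom-up and taking the
--     max, scan overlap lengths top-down and stop at the first (= longest) hit.
--     """
--     links = {}
--     joiners = set()
--     for i, s1 in enumerate(strings):
--         for j, s2 in enumerate(strings):
--             if i == j:
--                 continue
--             for k in range(min(len(s1), len(s2)) - 1, 2, -1):
--                 if s1[len(s1) - k:] == s2[:k]:
--                     joiners.add(s1[len(s1) - k:])
--                     links[s1] = s2
--                     break
--     return links, joiners
-- ===== Notes on version B (the rewrite author's own statement) =====
-- stated objective: alternative
-- what changed: A collects every matching overlap length bottom-up into a list and then takes max(key=len); B scans overlap lengths top-down and stops at the first (= longest) hit, updating links/joiners directly with no match list, no max pass and no empty-string sentinel, with explicit nested index loops instead of itertools.permutations.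
import Mathlib
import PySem

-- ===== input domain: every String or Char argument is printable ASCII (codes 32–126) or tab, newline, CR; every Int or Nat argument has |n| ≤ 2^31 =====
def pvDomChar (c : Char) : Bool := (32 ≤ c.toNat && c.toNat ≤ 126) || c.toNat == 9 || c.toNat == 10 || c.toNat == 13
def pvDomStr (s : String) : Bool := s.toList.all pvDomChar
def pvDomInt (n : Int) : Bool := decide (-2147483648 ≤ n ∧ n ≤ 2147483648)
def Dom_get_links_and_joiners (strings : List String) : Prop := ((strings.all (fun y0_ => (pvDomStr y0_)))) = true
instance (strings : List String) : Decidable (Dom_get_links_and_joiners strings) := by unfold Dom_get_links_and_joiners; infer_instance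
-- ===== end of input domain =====

-- B replaces A's bottom-up collect-all-overlaps-then-max with a top-down scan that
-- stops at the first (= longest) overlap, updating links/joiners directly (alternative
-- decomposition; same exact result).

-- ===== PORT A =====
-- A's helper get_match: the while loop collecting every matching overlap.
def get_match_loop (s1 s2 : String) (i : Nat) (ms : List String) : List String :=
  if h : (i : Int) < min (PySem.Str.len s1) (PySem.Str.len s2) then
    if PySem.Str.slice s1 (some (-(i : Int))) none ≠ PySem.Str.slice s2 none (some (i : Int)) then
      get_match_loop s1 s2 (i + 1) ms
    else
      get_match_loop s1 s2 (i + 1) (ms ++ [PySem.Str.slice s1 (some (-(i : Int))) none])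
  else ms
termination_by min s1.toList.length s2.toList.length - i
decreasing_by
  all_goals
  simp only [PySem.Str.len_eq] at h
  have hlt := lt_min_iff.mp h
  omega

-- loop index kept as a Nat: exact for the nonnegative min_overlap (always 3 here)
def get_match (s1 s2 : String) (min_overlap : Int) : String :=
  let ms := get_match_loop s1 s2 min_overlap.toNat []
  if ms = [] then "" else (PySem.List.max? ms PySem.Str.len).getD ""

def get_links_and_joiners (strings : List String) : (List (String × String)) × List String :=
  let res := (PySem.List.permutations strings 2).foldl
    (fun (st : PySem.Dict String String × PySem.Set String) p =>
      match p with
      | [s1, s2] =>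
        let m := get_match s1 s2 3
        if m ≠ "" then (st.1.insert s1 s2, PySem.Set.add st.2 m) else st
      | _ => st)
    (PySem.Dict.empty, PySem.Set.empty)
  (res.1.items, res.2)

-- ===== PORT B =====
-- B's inner 'for k in range(min(len(s1), len(s2)) - 1, 2, -1): … break' loop.
def overlap_scan (s1 s2 : String) (k : Nat) (links : PySem.Dict String String)
    (joiners : PySem.Set String) : PySem.Dict String String × PySem.Set String :=
  if 3 ≤ k then
    if PySem.Str.slice s1 (some (PySem.Str.len s1 - (k : Int))) none
        = PySem.Str.slice s2 none (some (k : Int)) then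
      (links.insert s1 s2,
       PySem.Set.add joiners (PySem.Str.slice s1 (some (PySem.Str.len s1 - (k : Int))) none))
    else overlap_scan s1 s2 (k - 1) links joiners
  else (links, joiners)
termination_by k
decreasing_by omega

-- range start as a Nat via toNat: exact (range(m-1, 2, -1) is empty exactly when m-1 < 3)
def get_links_and_joiners_alt (strings : List String) : (List (String × String)) × List String :=
  let res := (PySem.List.enumerate strings).foldl
    (fun (st : PySem.Dict String String × PySem.Set String) p =>
      (PySem.List.enumerate strings).foldl
        (fun st q =>
          if p.1 = q.1 then st
          else overlap_scan p.2 q.2 ((min (PySem.Str.len p.2) (PySem.Str.len q.2) - 1).toNat) st.1 st.2)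
        st)
    (PySem.Dict.empty, PySem.Set.empty)
  (res.1.items, res.2)

-- ===== PRECONDITION & SPEC =====
def Spec_get_links_and_joiners (strings : List String) (out : (List (String × String)) × List String) : Prop := out = get_links_and_joiners_alt strings
instance (strings : List String) (out : (List (String × String)) × List String) : Decidable (Spec_get_links_and_joiners strings out) := by unfold Spec_get_links_and_joiners; infer_instance

-- ===== CLAIM (what is proved, stated in full; the proofs are below) =====
def Claim_equal_get_links_and_joiners : Prop := ∀ (strings : List String), Dom_get_links_and_joiners strings → Spec_get_links_and_joiners strings (get_links_and_joiners strings)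

-- ===== LEMMAS AND PROOFS =====

-- the Boolean overlap test both programs decide at overlap length k
def pvQ (s1 s2 : String) (k : Nat) : Bool :=
  decide (s1.toList.drop (s1.toList.length - k) = s2.toList.take k)

-- the suffix of s1 of (clamped) length k, as a String
def pvSuf (s1 : String) (k : Nat) : String :=
  String.ofList (s1.toList.drop (s1.toList.length - k))

lemma slice_negA (s1 : String) (k : Nat) (hk : 0 < k) :
    PySem.Str.slice s1 (some (-(k : Int))) none = pvSuf s1 k := by
  apply String.toList_inj.mp
  rw [PySem.Str.toList_slice, PySem.Chars.slice_eq_listSlice,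
    PySem.List.slice_from_neg_natCast _ _ hk, pvSuf, String.toList_ofList]

lemma slice_pre (s2 : String) (k : Nat) :
    PySem.Str.slice s2 none (some (k : Int)) = String.ofList (s2.toList.take k) := by
  apply String.toList_inj.mp
  rw [PySem.Str.toList_slice, PySem.Chars.slice_eq_listSlice,
    PySem.List.slice_to_natCast, String.toList_ofList]

lemma slice_negB (s1 : String) (k : Nat) (hk : k ≤ s1.toList.length) :
    PySem.Str.slice s1 (some (PySem.Str.len s1 - (k : Int))) none = pvSuf s1 k := by
  apply String.toList_inj.mp
  rw [PySem.Str.toList_slice, PySem.Chars.slice_eq_listSlice, PySem.Str.len_eq,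
    PySem.List.slice_from _ (by omega), pvSuf, String.toList_ofList]
  congr 1
  omega

lemma condA_iff (s1 s2 : String) (k : Nat) (hk : 0 < k) :
    (PySem.Str.slice s1 (some (-(k : Int))) none = PySem.Str.slice s2 none (some (k : Int)))
      ↔ pvQ s1 s2 k = true := by
  rw [slice_negA s1 k hk, slice_pre, pvQ, decide_eq_true_iff]
  exact ⟨fun h => by simpa [pvSuf, String.toList_ofList] using congrArg String.toList h,
         fun h => congrArg String.ofList h⟩

lemma condB_iff (s1 s2 : String) (k : Nat) (hk : k ≤ s1.toList.length) :
    (PySem.Str.slice s1 (some (PySem.Str.len s1 - (k : Int))) none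
      = PySem.Str.slice s2 none (some (k : Int))) ↔ pvQ s1 s2 k = true := by
  rw [slice_negB s1 k hk, slice_pre, pvQ, decide_eq_true_iff]
  exact ⟨fun h => by simpa [pvSuf, String.toList_ofList] using congrArg String.toList h,
         fun h => congrArg String.ofList h⟩

lemma guard_iff (s1 s2 : String) (i : Nat) :
    ((i : Int) < min (PySem.Str.len s1) (PySem.Str.len s2))
      ↔ i < min s1.toList.length s2.toList.length := by
  simp only [PySem.Str.len_eq, lt_min_iff]
  omega

lemma aloop_spec (s1 s2 : String) (i : Nat) (hi : 0 < i) (ms : List String) :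
    get_match_loop s1 s2 i ms
      = ms ++ ((List.range' i (min s1.toList.length s2.toList.length - i)).filter
          (pvQ s1 s2)).map (pvSuf s1) := by
  set m := min s1.toList.length s2.toList.length with hm
  obtain ⟨n, hn⟩ : ∃ n, m - i = n := ⟨_, rfl⟩
  induction n generalizing i ms with
  | zero =>
    rw [get_match_loop, dif_neg (by rw [guard_iff, ← hm]; omega)]
    simp [hn]
  | succ n ih =>
    have him : i < m := by omega
    rw [get_match_loop, dif_pos (by rw [guard_iff, ← hm]; exact him)]
    rw [show m - i = n + 1 from hn, List.range'_succ]
    by_cases hc : PySem.Str.slice s1 (some (-(i : Int))) none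
        = PySem.Str.slice s2 none (some (i : Int))
    · rw [if_neg (by simpa using hc)]
      rw [ih (i + 1) (by omega) _ (by omega), show m - (i + 1) = n from by omega]
      have hq : pvQ s1 s2 i = true := (condA_iff s1 s2 i hi).mp hc
      simp only [List.filter_cons, hq, if_pos, List.map_cons]
      rw [slice_negA s1 i hi]
      simp [pvSuf]
    · rw [if_pos (by simpa using hc)]
      rw [ih (i + 1) (by omega) _ (by omega), show m - (i + 1) = n from by omega]
      have hq : pvQ s1 s2 i = false := by
        rw [← Bool.not_eq_true]
        exact fun h => hc ((condA_iff s1 s2 i hi).mpr h)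
      simp [hq]

lemma getLast?_le_of_pairwise {l : List Nat} (h : l.Pairwise (· < ·)) {x y : Nat}
    (hx : x ∈ l) (hy : l.getLast? = some y) : x ≤ y := by
  induction l with
  | nil => cases hx
  | cons a t ih =>
    cases t with
    | nil =>
      simp at hx hy
      omega
    | cons b t' =>
      rw [List.getLast?_cons_cons] at hy
      rcases List.mem_cons.mp hx with rfl | hx'
      · have hy' : y ∈ b :: t' := List.mem_of_getLast? hy
        have := (List.pairwise_cons.mp h).1 y hy'
        omega
      · exact ih (List.pairwise_cons.mp h).2 hx' hy

lemma get_match_spec (s1 s2 : String) :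
    get_match s1 s2 3
      = match ((List.range' 3 (min s1.toList.length s2.toList.length - 3)).filter
          (pvQ s1 s2)).getLast? with
        | some k => pvSuf s1 k
        | none => "" := by
  set m := min s1.toList.length s2.toList.length with hm
  rw [get_match]
  have h3 : (3 : Int).toNat = 3 := by decide
  rw [h3, aloop_spec s1 s2 3 (by omega) [], List.nil_append, ← hm]
  set ks := (List.range' 3 (m - 3)).filter (pvQ s1 s2) with hks
  have hmem : ∀ j ∈ ks, 3 ≤ j ∧ j < m := by
    intro j hj
    have h1 := List.mem_range'_1.mp (List.mem_filter.mp hj).1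
    omega
  have hlen : ∀ j ∈ ks, PySem.Str.len (pvSuf s1 j) = (j : Int) := by
    intro j hj
    have h2 : j ≤ s1.toList.length := by
      have := (hmem j hj).2
      omega
    simp [pvSuf, PySem.Str.len_eq, String.toList_ofList]
    rw [String.length_toList] at h2
    omega
  cases hlast : ks.getLast? with
  | none =>
    have : ks = [] := List.getLast?_eq_none_iff.mp hlast
    simp [this]
  | some k =>
    have hne : ks ≠ [] := by
      intro h; rw [h] at hlast; simp at hlast
    have hmapne : ks.map (pvSuf s1) ≠ [] := by simpa using hne
    rw [if_neg hmapne]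
    obtain ⟨mm, hmm⟩ : ∃ mm, PySem.List.max? (ks.map (pvSuf s1)) PySem.Str.len = some mm := by
      cases hq : PySem.List.max? (ks.map (pvSuf s1)) PySem.Str.len with
      | none => exact absurd ((PySem.List.max?_eq_none_iff _ _).mp hq) hmapne
      | some v => exact ⟨v, rfl⟩
    obtain ⟨j, hjks, hjmm⟩ := List.mem_map.mp (PySem.List.max?_mem hmm)
    have hkks : k ∈ ks := List.mem_of_getLast? hlast
    have hpw : ks.Pairwise (· < ·) :=
      List.Pairwise.sublist List.filter_sublist (List.pairwise_lt_range' 1)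
    have hjk : j ≤ k := getLast?_le_of_pairwise hpw hjks hlast
    have hkj : k ≤ j := by
      have hle := PySem.List.max?_isMax hmm (pvSuf s1 k) (List.mem_map_of_mem hkks)
      rw [hlen k hkks, ← hjmm, hlen j hjks] at hle
      exact_mod_cast hle
    have : j = k := le_antisymm hjk hkj
    rw [hmm, Option.getD_some, ← hjmm, this]

lemma bscan_spec (s1 s2 : String) (k : Nat) (hk : k ≤ s1.toList.length)
    (links : PySem.Dict String String) (joiners : PySem.Set String) :
    overlap_scan s1 s2 k links joiners
      = match ((List.range' 3 (k - 2)).filter (pvQ s1 s2)).getLast? with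
        | some j => (links.insert s1 s2, PySem.Set.add joiners (pvSuf s1 j))
        | none => (links, joiners) := by
  induction k with
  | zero => rw [overlap_scan]; simp
  | succ k ih =>
    rw [overlap_scan]
    by_cases h3 : 3 ≤ k + 1
    · rw [if_pos h3]
      have hk1 : k + 1 ≤ s1.toList.length := hk
      have hrange : List.range' 3 (k + 1 - 2) = List.range' 3 (k - 2) ++ [k + 1] := by
        rw [show k + 1 - 2 = (k - 2) + 1 from by omega, List.range'_1_concat,
          show 3 + (k - 2) = k + 1 from by omega]
      by_cases hc : PySem.Str.slice s1 (some (PySem.Str.len s1 - ((k + 1 : Nat) : Int))) none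
          = PySem.Str.slice s2 none (some ((k + 1 : Nat) : Int))
      · rw [if_pos hc]
        have hq : pvQ s1 s2 (k + 1) = true := (condB_iff s1 s2 (k + 1) hk1).mp hc
        rw [hrange, List.filter_append]
        simp only [List.filter_cons, hq, List.filter_nil]
        rw [List.getLast?_append, slice_negB s1 (k + 1) hk1]
        simp
      · rw [if_neg hc]
        have hq : pvQ s1 s2 (k + 1) = false := by
          rw [← Bool.not_eq_true]
          exact fun h => hc ((condB_iff s1 s2 (k + 1) hk1).mpr h)
        simp only [Nat.add_sub_cancel]
        rw [ih (by omega), hrange, List.filter_append]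
        simp [hq]
    · rw [if_neg h3]
      rw [show k + 1 - 2 = 0 from by omega]
      simp

-- the per-pair update both programs make, phrased with A's get_match
def pvStep (st : PySem.Dict String String × PySem.Set String) (s1 s2 : String) :
    PySem.Dict String String × PySem.Set String :=
  if get_match s1 s2 3 ≠ "" then (st.1.insert s1 s2, PySem.Set.add st.2 (get_match s1 s2 3)) else st

lemma step_eq (s1 s2 : String) (st : PySem.Dict String String × PySem.Set String) :
    overlap_scan s1 s2 ((min (PySem.Str.len s1) (PySem.Str.len s2) - 1).toNat) st.1 st.2
      = pvStep st s1 s2 := by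
  set m := min s1.toList.length s2.toList.length with hm
  have hK : (min (PySem.Str.len s1) (PySem.Str.len s2) - 1).toNat = m - 1 := by
    simp only [PySem.Str.len_eq, ← Nat.cast_min]
    omega
  rw [hK, bscan_spec s1 s2 (m - 1) (by omega) st.1 st.2,
    show m - 1 - 2 = m - 3 from by omega]
  rw [pvStep, get_match_spec s1 s2, ← hm]
  cases hlast : ((List.range' 3 (m - 3)).filter (pvQ s1 s2)).getLast? with
  | none => simp
  | some j =>
    have hj : 3 ≤ j ∧ j < m := by
      have hmem := (List.mem_filter.mp (List.mem_of_getLast? hlast)).1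
      have := List.mem_range'_1.mp hmem
      omega
    have hne : pvSuf s1 j ≠ "" := by
      intro h
      have := congrArg String.toList h
      rw [pvSuf, String.toList_ofList] at this
      have hlenz := congrArg List.length this
      simp at hlenz
      rw [← String.length_toList] at hlenz
      omega
    simp [hne]

lemma flatMap_range_singleton (ys : List String) :
    (List.range ys.length).flatMap (fun i =>
        match ys[i]? with
        | none => ([] : List (List String))
        | some y => [[y]]) = ys.map (fun y => [y]) := by
  induction ys with
  | nil => simp
  | cons a t ih =>
    rw [List.length_cons, List.range_succ_eq_map, List.flatMap_cons, List.flatMap_map]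
    simp only [List.getElem?_cons_zero, List.getElem?_cons_succ]
    rw [List.map_cons, ← ih]
    rfl

lemma perm1_eq (ys : List String) :
    PySem.List.permutations ys 1 = ys.map (fun y => [y]) := by
  rw [PySem.List.permutations, ← flatMap_range_singleton ys]
  apply List.flatMap_congr
  intro i _
  cases h : ys[i]? with
  | none => rfl
  | some y => simp [PySem.List.permutations]

lemma perm2_eq (xs : List String) :
    PySem.List.permutations xs 2
      = (List.range xs.length).flatMap (fun i =>
          match xs[i]? with
          | none => []
          | some x => (xs.eraseIdx i).map (fun y => [x, y])) := by
  rw [PySem.List.permutations]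
  apply List.flatMap_congr
  intro i _
  cases h : xs[i]? with
  | none => rfl
  | some x => rw [perm1_eq]; simp [List.map_map]

lemma enum_eq (xs : List String) (s : Int) :
    PySem.List.enumerate xs s = (List.range xs.length).map (fun (i : Nat) => (s + (i : Int), xs.getD i "")) := by
  induction xs generalizing s with
  | nil => simp [PySem.List.enumerate_nil]
  | cons a t ih =>
    rw [PySem.List.enumerate_cons, List.length_cons, List.range_succ_eq_map,
      List.map_cons, List.map_map]
    simp only [Nat.cast_zero, add_zero, List.getD_cons_zero]
    rw [ih (s + 1)]
    congr 1
    apply List.map_congr_left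
    intro j _
    simp [Function.comp]
    ring

lemma range_map_getD (ys : List String) :
    (List.range ys.length).map (fun j => ys.getD j "") = ys := by
  induction ys with
  | nil => simp
  | cons a t ih =>
    rw [List.length_cons, List.range_succ_eq_map, List.map_cons, List.map_map]
    simp only [List.getD_cons_zero]
    rw [show ((fun j => (a :: t).getD j "") ∘ Nat.succ) = (fun j => t.getD j "") from rfl, ih]

lemma range_filter_ne_map_getD (xs : List String) (i : Nat) (hi : i < xs.length) :
    ((List.range xs.length).filter (fun j => decide ¬(i = j))).map (fun j => xs.getD j "")
      = xs.eraseIdx i := by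
  induction xs generalizing i with
  | nil => simp at hi
  | cons a t ih =>
    rw [List.length_cons, List.range_succ_eq_map]
    cases i with
    | zero =>
      rw [List.filter_cons]
      simp only [not_true_eq_false, decide_false, Bool.false_eq_true, if_false, List.filter_map]
      rw [show ((fun j => decide ¬(0 = j)) ∘ Nat.succ) = (fun _ => true) from by
        funext j; simp [Function.comp], List.filter_true, List.map_map]
      rw [show ((fun j => (a :: t).getD j "") ∘ Nat.succ) = (fun j => t.getD j "") from rfl]
      rw [List.eraseIdx_cons_zero, range_map_getD]
    | succ i' =>
      rw [List.filter_cons]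
      simp only [List.filter_map]
      rw [show (decide ¬(i' + 1 = 0)) = true from by simp]
      rw [show ((fun j => decide ¬(i' + 1 = j)) ∘ Nat.succ) = (fun j => decide ¬(i' = j)) from by
        funext j; simp [Function.comp]]
      rw [if_pos rfl, List.map_cons, List.map_map]
      simp only [List.getD_cons_zero]
      rw [show ((fun j => (a :: t).getD j "") ∘ Nat.succ) = (fun j => t.getD j "") from rfl]
      rw [List.eraseIdx_cons_succ, ih i' (by simpa using hi)]

lemma folds_eq (xs : List String) (init : PySem.Dict String String × PySem.Set String) :
    (PySem.List.permutations xs 2).foldl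
      (fun (st : PySem.Dict String String × PySem.Set String) p =>
        match p with
        | [s1, s2] =>
          let m := get_match s1 s2 3
          if m ≠ "" then (st.1.insert s1 s2, PySem.Set.add st.2 m) else st
        | _ => st) init
    = (PySem.List.enumerate xs).foldl
      (fun (st : PySem.Dict String String × PySem.Set String) p =>
        (PySem.List.enumerate xs).foldl
          (fun st q =>
            if p.1 = q.1 then st
            else overlap_scan p.2 q.2 ((min (PySem.Str.len p.2) (PySem.Str.len q.2) - 1).toNat) st.1 st.2)
          st) init := by
  rw [perm2_eq, List.flatMap_def, List.foldl_flatten, List.foldl_map, enum_eq xs 0,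
    List.foldl_map]
  apply PySem.List.foldl_congr_mem
  intro st i hi
  have hin : i < xs.length := List.mem_range.mp hi
  rw [List.getElem?_eq_getElem hin]
  trans ((xs.eraseIdx i).foldl (fun st y => pvStep st (xs[i]'hin) y) st)
  · rw [List.foldl_map]
    rfl
  · rw [List.foldl_map]
    simp only []
    simp only [List.getD_eq_getElem xs "" hin]
    rw [show (fun (st : PySem.Dict String String × PySem.Set String) (j : Nat) =>
          if ((0 : Int) + ↑i = 0 + ↑j) then st
          else overlap_scan (xs[i]'hin) (xs.getD j "")
            ((min (PySem.Str.len (xs[i]'hin)) (PySem.Str.len (xs.getD j "")) - 1).toNat) st.1 st.2)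
        = (fun st j => if ¬(i = j) then pvStep st (xs[i]'hin) (xs.getD j "") else st) from by
      funext st j
      by_cases h : i = j
      · simp [h]
      · rw [if_neg (by omega), if_pos h, step_eq]]
    rw [PySem.List.foldl_ite_eq_foldl_filter (fun j => ¬(i = j))
      (fun st j => pvStep st (xs[i]'hin) (xs.getD j "")),
      ← range_filter_ne_map_getD xs i hin, List.foldl_map]

-- ===== VERDICT (by name: the statement is the Claim_ definition above) =====
theorem get_links_and_joiners_spec : Claim_equal_get_links_and_joiners := by
  intro strings _
  unfold Spec_get_links_and_joiners get_links_and_joiners get_links_and_joiners_alt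
  rw [folds_eq]
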